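-- pv_equiv track=rewrite | github.com/abdelfattah-lab/SplitReason | modes/speculative_reasoning.py | get_bigmodel_mask
-- ===== SOURCE A (Python) =====
-- def get_bigmodel_mask(text, open_tag="<bigmodel>", close_tag="</bigmodel>"):
--     mask = [0] * len(text)
--     start_index = 0
--
--     while True:
--         open_pos = text.find(open_tag, start_index)
--         if open_pos == -1:
--             break  # no more openings
--
--         close_pos = text.find(close_tag, open_pos + len(open_tag))
--         if close_pos == -1:
--             # If we can't find a close tag, mark until the end of the text
--             for i in range(open_pos, len(text)):
--                 mask[i] = 1
--             break
--         else:
--             # Mark the region from <bigmodel> ... </bigmodel>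
--             region_end = close_pos + len(close_tag)
--             for i in range(open_pos, region_end):
--                 mask[i] = 1
--             start_index = region_end
--
--     return mask
-- ===== SOURCE B (Python) =====
-- def get_bigmodel_mask(text, open_tag="<bigmodel>", close_tag="</bigmodel>"):
--     # Single left-to-right character scan with an inside/outside state machine:
--     # no str.find calls; the mask is built by appending one run per recognised token.
--     n = len(text)
--     mask = []
--     i = 0
--     inside = False
--     while i < n:
--         if not inside:
--             if text.startswith(open_tag, i):
--                 inside = True
--                 mask.extend([1] * len(open_tag))
--                 i += len(open_tag)
--             else:
--                 mask.append(0)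
--                 i += 1
--         else:
--             if text.startswith(close_tag, i):
--                 inside = False
--                 mask.extend([1] * len(close_tag))
--                 i += len(close_tag)
--             else:
--                 mask.append(1)
--                 i += 1
--     return mask
-- ===== Notes on version B (the rewrite author's own statement) =====
-- stated objective: alternative
-- what changed: B replaces A's find-based jump loop with a single left-to-right character scan driven by an inside/outside state machine: it never calls str.find, tests startswith at the current position, and builds the mask by appending one 0/1 run per recognised token.
import Mathlib
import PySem

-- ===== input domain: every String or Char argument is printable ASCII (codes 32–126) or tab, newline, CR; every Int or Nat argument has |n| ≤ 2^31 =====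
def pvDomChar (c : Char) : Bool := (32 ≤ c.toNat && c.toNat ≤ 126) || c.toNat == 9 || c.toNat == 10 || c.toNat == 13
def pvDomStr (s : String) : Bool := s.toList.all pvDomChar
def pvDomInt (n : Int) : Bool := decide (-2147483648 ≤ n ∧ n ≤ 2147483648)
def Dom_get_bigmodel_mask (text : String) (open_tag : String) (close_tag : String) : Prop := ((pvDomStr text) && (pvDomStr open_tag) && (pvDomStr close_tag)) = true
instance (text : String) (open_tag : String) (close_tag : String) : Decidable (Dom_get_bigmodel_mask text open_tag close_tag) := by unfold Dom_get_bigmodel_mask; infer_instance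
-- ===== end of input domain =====

-- B replaces A's find-based jump loop with a single left-to-right character scan driven by
-- an inside/outside state machine, building the mask by appending 0/1 runs (objective: alternative).

-- ===== PORT A =====
-- A's while-loop, transliterated with a fuel guard (fuel only makes the recursion
-- total; under Pre_ it never runs out, see the proofs below).
def maskLoopA (text open_tag close_tag : String) (mask : List Int) (start_index : Int) : Nat → List Int
  | 0 => mask
  | fuel + 1 =>
    let open_pos := PySem.Str.findFrom text open_tag start_index
    if open_pos = -1 then mask
    else
      let close_pos := PySem.Str.findFrom text close_tag (open_pos + PySem.Str.len open_tag)
      if close_pos = -1 then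
        (PySem.List.pyRange open_pos (PySem.Str.len text) 1).foldl (fun m i => m.set i.toNat 1) mask
      else
        let region_end := close_pos + PySem.Str.len close_tag
        maskLoopA text open_tag close_tag
          ((PySem.List.pyRange open_pos region_end 1).foldl (fun m i => m.set i.toNat 1) mask)
          region_end fuel

def get_bigmodel_mask (text : String) (open_tag : String) (close_tag : String) : List Int :=
  maskLoopA text open_tag close_tag (List.replicate text.length 0) 0 (text.length + 1)

-- ===== PORT B =====
-- Source B's 'while i < n' scan with the inside/outside state; the fuel argument only makes the
-- recursion total (it never runs out under Pre_). text.startswith(tag, i) with 0 ≤ i ≤ n is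
-- exactly PySem.Chars.startswith on text.toList.drop i.
def scanB (text open_tag close_tag : String) (i : Nat) (inside : Bool) : Nat → List Int
  | 0 => []
  | fuel + 1 =>
    if i < text.length then
      if inside = false then
        if PySem.Chars.startswith (text.toList.drop i) open_tag.toList then
          List.replicate open_tag.length 1 ++ scanB text open_tag close_tag (i + open_tag.length) true fuel
        else
          0 :: scanB text open_tag close_tag (i + 1) false fuel
      else
        if PySem.Chars.startswith (text.toList.drop i) close_tag.toList then
          List.replicate close_tag.length 1 ++ scanB text open_tag close_tag (i + close_tag.length) false fuel
        else
          1 :: scanB text open_tag close_tag (i + 1) true fuel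
    else []

def get_bigmodel_mask_alt (text : String) (open_tag : String) (close_tag : String) : List Int :=
  scanB text open_tag close_tag 0 false (3 * text.length + 3)

-- ===== PRECONDITION & SPEC =====
-- Pre_ excludes only the inputs where BOTH tags are the empty string: there A's
-- while-loop never advances start_index and diverges (B diverges there too).
def Pre_get_bigmodel_mask (text : String) (open_tag : String) (close_tag : String) : Prop :=
  ¬ (open_tag = "" ∧ close_tag = "")
instance (text : String) (open_tag : String) (close_tag : String) : Decidable (Pre_get_bigmodel_mask text open_tag close_tag) := by unfold Pre_get_bigmodel_mask; infer_instance

def pvWitness_get_bigmodel_mask : String × String × String :=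
  ("x<b>y</b>z<b>w", "<b>", "</b>")

def Spec_get_bigmodel_mask (text : String) (open_tag : String) (close_tag : String) (out : List Int) : Prop := out = get_bigmodel_mask_alt text open_tag close_tag
instance (text : String) (open_tag : String) (close_tag : String) (out : List Int) : Decidable (Spec_get_bigmodel_mask text open_tag close_tag out) := by unfold Spec_get_bigmodel_mask; infer_instance

-- ===== CLAIM (what is proved, stated in full; the proofs are below) =====
def Claim_equal_get_bigmodel_mask : Prop := ∀ (text : String) (open_tag : String) (close_tag : String), Dom_get_bigmodel_mask text open_tag close_tag → Pre_get_bigmodel_mask text open_tag close_tag → Spec_get_bigmodel_mask text open_tag close_tag (get_bigmodel_mask text open_tag close_tag)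

-- ===== LEMMAS AND PROOFS =====

-- Proof-side helper: the list of tagged (start, end) intervals A's loop traverses.
def segsB (text open_tag close_tag : String) (pos : Int) : Nat → List (Int × Int)
  | 0 => []
  | fuel + 1 =>
    let o := PySem.Str.findFrom text open_tag pos
    if o = -1 then []
    else
      let c := PySem.Str.findFrom text close_tag (o + PySem.Str.len open_tag)
      let e := if c = -1 then PySem.Str.len text else c + PySem.Str.len close_tag
      if c = -1 then [(o, e)]
      else (o, e) :: segsB text open_tag close_tag e fuel

-- The 0/1 splice both programs compute, one segment at a time.
def zpaint : List (Int × Int) → Int → Int → List Int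
  | [], prev, n => List.replicate (n - prev).toNat 0
  | (s, e) :: rest, prev, n =>
      List.replicate (s - prev).toNat 0 ++ List.replicate (e - s).toNat 1 ++ zpaint rest e n

-- Painting [1]s over [s, e) by repeated .set equals a take/replicate/drop splice.
theorem paint_aux : ∀ (d : Nat) (mask : List Int) (s e : Nat), e - s = d → s ≤ e → e ≤ mask.length →
    (PySem.List.pyRange (s : Int) (e : Int) 1).foldl (fun m i => m.set i.toNat 1) mask
      = mask.take s ++ List.replicate (e - s) 1 ++ mask.drop e := by
  intro d
  induction d with
  | zero =>
    intro mask s e hd hse he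
    have : s = e := by omega
    subst this
    have hr : PySem.List.pyRange (s : Int) (s : Int) 1 = [] := by
      simp
    simp [hr]
  | succ d ih =>
    intro mask s e hd hse he
    have hlt : s < e := by omega
    rw [PySem.List.pyRange_one_cons (by exact_mod_cast hlt)]
    have hcast : ((s : Int) + 1) = ((s + 1 : Nat) : Int) := by push_cast; ring
    rw [List.foldl_cons, hcast]
    have hslen : s < mask.length := by omega
    rw [ih (mask.set (s : Int).toNat 1) (s + 1) e (by omega) (by omega) (by simpa using he)]
    simp only [Int.toNat_natCast]
    rw [List.take_add_one]
    simp [List.take_set, List.set_eq_of_length_le, List.drop_set_of_lt (hnm := hlt), hslen]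
    have : e - s = (e - (s + 1)) + 1 := by omega
    rw [this, List.replicate_succ]
    simp

-- A successful findFrom lands at or after its start and leaves room for the needle.
theorem findFrom_bounds (s sub : List Char) (k : Nat) (hk : k ≤ s.length)
    (h : PySem.Chars.findFrom s sub (k : Int) none ≠ -1) :
    (k : Int) ≤ PySem.Chars.findFrom s sub (k : Int) none ∧
      (PySem.Chars.findFrom s sub (k : Int) none).toNat + sub.length ≤ s.length := by
  obtain ⟨h1, h2, h3⟩ := PySem.Chars.findFrom_natCast_spec s sub k hk h
  refine ⟨h1, ?_⟩
  have hlen := h2.length_le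
  simp only [List.length_drop] at hlen
  by_cases hms : (PySem.Chars.findFrom s sub (k : Int) none).toNat ≤ s.length
  · omega
  · exfalso
    have hsub : sub = [] := List.length_eq_zero_iff.mp (by omega)
    exact h3 s.length hk (by omega) (by simp [hsub])

-- A zero suffix lets take/drop be rewritten into explicit replicate runs.
theorem zero_suffix_take (mask : List Int) (si k n : Nat) (hlen : mask.length = n)
    (hdrop : mask.drop si = List.replicate (n - si) 0) (hsk : si ≤ k) (hk : k ≤ n) :
    mask.take k = mask.take si ++ List.replicate (k - si) (0 : Int) := by
  conv_lhs => rw [← List.take_append_drop si mask, hdrop]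
  rw [List.take_append]
  have hts : (mask.take si).length = si := by simp; omega
  rw [hts, List.take_take, Nat.min_eq_right hsk, List.take_replicate]
  congr 1
  simp
  omega

theorem zero_suffix_drop (mask : List Int) (si k n : Nat) (_hlen : mask.length = n)
    (hdrop : mask.drop si = List.replicate (n - si) 0) (hsk : si ≤ k) :
    mask.drop k = List.replicate (n - k) (0 : Int) := by
  have h : mask.drop k = (mask.drop si).drop (k - si) := by
    rw [List.drop_drop]
    congr 1
    omega
  rw [h, hdrop, List.drop_replicate]
  congr 1
  omega

-- A's loop agrees with the segment splice: the mask after the loop is its prefix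
-- before si plus the zpaint of the remaining segments.
theorem loop_eq (text open_tag close_tag : String)
    (hpre : ¬ (open_tag = "" ∧ close_tag = "")) :
    ∀ (fuel : Nat) (si : Nat) (mask : List Int),
      si ≤ text.length → text.length - si < fuel → mask.length = text.length →
      mask.drop si = List.replicate (text.length - si) 0 →
      maskLoopA text open_tag close_tag mask (si : Int) fuel
        = mask.take si ++ zpaint (segsB text open_tag close_tag (si : Int) fuel) (si : Int) (text.length : Int) := by
  intro fuel
  induction fuel with
  | zero => intro si mask _ hfuel _ _; omega
  | succ fuel ih =>
    intro si mask hsin hfuel hlen hdrop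
    have hLlen : text.toList.length = text.length := by simp
    have hOlen : open_tag.toList.length = open_tag.length := by simp
    have hClen : close_tag.toList.length = close_tag.length := by simp
    have hlen1 : 1 ≤ open_tag.length + close_tag.length := by
      by_cases ho : open_tag = ""
      · have hc : ¬ close_tag = "" := fun hc => hpre ⟨ho, hc⟩
        have := String.length_eq_zero_iff (s := close_tag)
        by_contra hcon
        exact hc (this.mp (by omega))
      · have := String.length_eq_zero_iff (s := open_tag)
        by_contra hcon
        exact ho (this.mp (by omega))
    have hlenT : PySem.Str.len text = ((text.length : Nat) : Int) := by simp [PySem.Str.len]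
    simp only [maskLoopA, segsB, PySem.Str.findFrom_eq]
    set opI := PySem.Chars.findFrom text.toList open_tag.toList (si : Int) none with hopIdef
    by_cases hop1 : opI = -1
    · simp only [hop1, reduceIte, zpaint]
      have e0 : ((text.length : Int) - (si : Int)).toNat = text.length - si := by omega
      rw [e0, ← hdrop, List.take_append_drop]
    · simp only [if_neg hop1]
      obtain ⟨hople, hopub⟩ := findFrom_bounds text.toList open_tag.toList si (by omega) (by rw [← hopIdef]; exact hop1)
      rw [← hopIdef] at hople hopub
      rw [hLlen] at hopub
      have hopnn : (0 : Int) ≤ opI := le_trans (by exact_mod_cast Nat.zero_le si) hople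
      have hopcast : opI = ((opI.toNat : Nat) : Int) := by omega
      have hk2 : opI + PySem.Str.len open_tag = ((opI.toNat + open_tag.length : Nat) : Int) := by
        simp [PySem.Str.len]
        omega
      rw [hk2]
      set cpI := PySem.Chars.findFrom text.toList close_tag.toList
        ((opI.toNat + open_tag.length : Nat) : Int) none with hcpIdef
      by_cases hcp1 : cpI = -1
      · simp only [hcp1, reduceIte, zpaint]
        rw [hlenT, hopcast,
          paint_aux (text.length - opI.toNat) mask opI.toNat text.length rfl (by omega) (by omega)]
        rw [zero_suffix_take mask si opI.toNat text.length hlen hdrop (by omega) (by omega)]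
        rw [List.drop_of_length_le (by omega)]
        have e1 : ((opI.toNat : Int) - (si : Int)).toNat = opI.toNat - si := by omega
        have e2 : ((text.length : Int) - (opI.toNat : Int)).toNat = text.length - opI.toNat := by omega
        have e3 : ((text.length : Int) - (text.length : Int)).toNat = 0 := by omega
        rw [e1, e2, e3]
        simp [List.append_assoc]
      · simp only [if_neg hcp1]
        obtain ⟨hcple, hcpub⟩ := findFrom_bounds text.toList close_tag.toList
          (opI.toNat + open_tag.length) (by omega) (by rw [← hcpIdef]; exact hcp1)
        rw [← hcpIdef] at hcple hcpub
        rw [hLlen] at hcpub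
        have hre : cpI + PySem.Str.len close_tag = ((cpI.toNat + close_tag.length : Nat) : Int) := by
          simp [PySem.Str.len]
          omega
        set ren := cpI.toNat + close_tag.length with hrendef
        have hrenle : ren ≤ text.length := by omega
        have hrengt : si < ren := by omega
        rw [hre, hopcast,
          paint_aux (ren - opI.toNat) mask opI.toNat ren rfl (by omega) (by omega)]
        have hmask' :
            mask.take opI.toNat ++ List.replicate (ren - opI.toNat) 1 ++ mask.drop ren
              = (mask.take opI.toNat ++ List.replicate (ren - opI.toNat) 1) ++ mask.drop ren := by
          simp [List.append_assoc]
        have hprefLen : (mask.take opI.toNat ++ List.replicate (ren - opI.toNat) (1 : Int)).length = ren := by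
          simp
          omega
        have hdropren : mask.drop ren = List.replicate (text.length - ren) (0 : Int) :=
          zero_suffix_drop mask si ren text.length hlen hdrop (by omega)
        rw [hmask']
        rw [ih ren _ hrenle (by omega)
          (by simp [hdropren]; omega)
          (by rw [List.drop_append_of_le_length (by omega)]
              rw [List.drop_of_length_le (by omega), List.nil_append, hdropren])]
        rw [List.take_append_of_le_length (by omega), List.take_of_length_le (by omega)]
        rw [zero_suffix_take mask si opI.toNat text.length hlen hdrop (by omega) (by omega)]
        simp only [zpaint]
        have e1 : ((opI.toNat : Int) - (si : Int)).toNat = opI.toNat - si := by omega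
        have e2 : ((ren : Int) - (opI.toNat : Int)).toNat = ren - opI.toNat := by omega
        rw [e1, e2]
        simp [List.append_assoc]

-- scanB at or past the end of the text returns [].
theorem scan_end (text o c : String) (i : Nat) (b : Bool) (f : Nat) (h : text.length ≤ i) :
    scanB text o c i b f = [] := by
  cases f with
  | zero => simp [scanB]
  | succ f => simp [scanB, Nat.not_lt.mpr h]

-- Outside a region, positions with no open-tag match each emit a 0.
theorem scan_skip_zeros (text o c : String) :
    ∀ (k i f : Nat), i + k ≤ text.length →
    (∀ j, i ≤ j → j < i + k → ¬ o.toList <+: text.toList.drop j) →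
    scanB text o c i false (k + f) = List.replicate k 0 ++ scanB text o c (i + k) false f := by
  intro k
  induction k with
  | zero => intro i f _ _; simp
  | succ k ih =>
    intro i f hle hno
    have hi : i < text.length := by omega
    have hns : PySem.Chars.startswith (text.toList.drop i) o.toList = false := by
      rw [← Bool.not_eq_true, PySem.Chars.startswith_iff]
      exact hno i le_rfl (by omega)
    have hf : k + 1 + f = (k + f) + 1 := by omega
    rw [hf]
    simp only [scanB, if_pos hi, reduceIte, hns, Bool.false_eq_true]
    rw [ih (i + 1) f (by omega) (fun j h1 h2 => hno j (by omega) (by omega))]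
    have : i + 1 + k = i + (k + 1) := by omega
    rw [this, List.replicate_succ]
    simp

-- Inside a region, positions with no close-tag match each emit a 1.
theorem scan_skip_ones (text o c : String) :
    ∀ (k i f : Nat), i + k ≤ text.length →
    (∀ j, i ≤ j → j < i + k → ¬ c.toList <+: text.toList.drop j) →
    scanB text o c i true (k + f) = List.replicate k 1 ++ scanB text o c (i + k) true f := by
  intro k
  induction k with
  | zero => intro i f _ _; simp
  | succ k ih =>
    intro i f hle hno
    have hi : i < text.length := by omega
    have hns : PySem.Chars.startswith (text.toList.drop i) c.toList = false := by
      rw [← Bool.not_eq_true, PySem.Chars.startswith_iff]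
      exact hno i le_rfl (by omega)
    have hf : k + 1 + f = (k + f) + 1 := by omega
    rw [hf]
    simp only [scanB, if_pos hi, reduceIte, hns, Bool.false_eq_true]
    rw [ih (i + 1) f (by omega) (fun j h1 h2 => hno j (by omega) (by omega))]
    have : i + 1 + k = i + (k + 1) := by omega
    rw [this, List.replicate_succ]
    simp

-- A prefix of a later drop is an infix of an earlier drop.
theorem prefix_drop_infix (l p : List Char) (i j : Nat) (hij : i ≤ j)
    (h : p <+: l.drop j) : p <:+: l.drop i := by
  have : l.drop j = (l.drop i).drop (j - i) := by rw [List.drop_drop]; congr 1; omega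
  rw [this] at h
  exact h.isInfix.trans (List.drop_suffix _ _).isInfix


-- One scan step that recognises the open tag.
theorem scan_step_open (text o c : String) (i f : Nat) (hi : i < text.length)
    (h : o.toList <+: text.toList.drop i) :
    scanB text o c i false (f + 1)
      = List.replicate o.length 1 ++ scanB text o c (i + o.length) true f := by
  simp [scanB, hi, (PySem.Chars.startswith_iff _ _).mpr h]

-- One scan step that recognises the close tag.
theorem scan_step_close (text o c : String) (i f : Nat) (hi : i < text.length)
    (h : c.toList <+: text.toList.drop i) :
    scanB text o c i true (f + 1)
      = List.replicate c.length 1 ++ scanB text o c (i + c.length) false f := by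
  simp [scanB, hi, (PySem.Chars.startswith_iff _ _).mpr h]

-- B's scan also computes the segment splice.
theorem scan_eq_zpaint (text open_tag close_tag : String)
    (hpre : ¬ (open_tag = "" ∧ close_tag = "")) :
    ∀ (fuel2 : Nat) (i F : Nat), i ≤ text.length → text.length - i < fuel2 →
      3 * (text.length - i) + 1 ≤ F →
      scanB text open_tag close_tag i false F
        = zpaint (segsB text open_tag close_tag (i : Int) fuel2) (i : Int) (text.length : Int) := by
  intro fuel2
  induction fuel2 with
  | zero => intro i F hi hfuel _; omega
  | succ fuel2 ih =>
    intro i F hi hfuel hF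
    have hLlen : text.toList.length = text.length := by simp
    have hOlen : open_tag.toList.length = open_tag.length := by simp
    have hClen : close_tag.toList.length = close_tag.length := by simp
    have hlen1 : 1 ≤ open_tag.length + close_tag.length := by
      by_cases ho : open_tag = ""
      · have hc : ¬ close_tag = "" := fun hc => hpre ⟨ho, hc⟩
        have := String.length_eq_zero_iff (s := close_tag)
        by_contra hcon
        exact hc (this.mp (by omega))
      · have := String.length_eq_zero_iff (s := open_tag)
        by_contra hcon
        exact ho (this.mp (by omega))
    have hlenT : PySem.Str.len text = ((text.length : Nat) : Int) := by simp [PySem.Str.len]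
    simp only [segsB, PySem.Str.findFrom_eq]
    set opI := PySem.Chars.findFrom text.toList open_tag.toList (i : Int) none with hopIdef
    by_cases hop1 : opI = -1
    · -- no open tag from i: the scan emits only zeros
      have hno : ∀ j, i ≤ j → j < i + (text.length - i) → ¬ open_tag.toList <+: text.toList.drop j := by
        intro j h1 h2 hp
        exact (PySem.Chars.findFrom_natCast_eq_neg_one_iff text.toList open_tag.toList i
          (by omega)).mp (by rw [← hopIdef]; exact hop1) (prefix_drop_infix _ _ i j h1 hp)
      have hFs : F = (text.length - i) + (F - (text.length - i)) := by omega
      rw [hFs, scan_skip_zeros text open_tag close_tag _ i _ (by omega) hno,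
        scan_end _ _ _ _ _ _ (by omega)]
      simp only [hop1, reduceIte, zpaint]
      have e0 : ((text.length : Int) - (i : Int)).toNat = text.length - i := by omega
      rw [e0]
      simp
    · simp only [if_neg hop1]
      obtain ⟨hople, hopub⟩ := findFrom_bounds text.toList open_tag.toList i (by omega)
        (by rw [← hopIdef]; exact hop1)
      obtain ⟨_, hopPre, hopMin⟩ := PySem.Chars.findFrom_natCast_spec text.toList open_tag.toList i
        (by omega) (by rw [← hopIdef]; exact hop1)
      rw [← hopIdef] at hople hopub hopPre hopMin
      rw [hLlen] at hopub
      have hopnn : (0 : Int) ≤ opI := le_trans (by exact_mod_cast Nat.zero_le i) hople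
      have hopcast : opI = ((opI.toNat : Nat) : Int) := by omega
      set o := opI.toNat with hodef
      have hio : i ≤ o := by omega
      have houb : o + open_tag.length ≤ text.length := by omega
      -- skip the zeros before the open tag
      have hnoO : ∀ j, i ≤ j → j < i + (o - i) → ¬ open_tag.toList <+: text.toList.drop j := by
        intro j h1 h2 hp
        exact hopMin j h1 (by omega) hp
      have hFs : F = (o - i) + (F - (o - i)) := by omega
      rw [hFs, scan_skip_zeros text open_tag close_tag _ i _ (by omega) hnoO]
      have hiok : i + (o - i) = o := by omega
      rw [hiok]
      set F1 := F - (o - i) with hF1def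
      have hF1 : 3 * (text.length - o) + 1 ≤ F1 := by omega
      have hk2 : opI + PySem.Str.len open_tag = ((o + open_tag.length : Nat) : Int) := by
        simp [PySem.Str.len]
        omega
      rw [hk2]
      set cpI := PySem.Chars.findFrom text.toList close_tag.toList
        ((o + open_tag.length : Nat) : Int) none with hcpIdef
      by_cases hcp1 : cpI = -1
      · -- open but no close: ones to the end of the text
        simp only [hcp1, reduceIte, zpaint]
        have hnoC : ∀ j, o + open_tag.length ≤ j → ¬ close_tag.toList <+: text.toList.drop j := by
          intro j h1 hp
          exact (PySem.Chars.findFrom_natCast_eq_neg_one_iff text.toList close_tag.toList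
            (o + open_tag.length) (by omega)).mp (by rw [← hcpIdef]; exact hcp1)
            (prefix_drop_infix _ _ (o + open_tag.length) j h1 hp)
        by_cases hon : o < text.length
        · obtain ⟨F2, hF2⟩ : ∃ F2, F1 = F2 + 1 := ⟨F1 - 1, by omega⟩
          rw [hF2, scan_step_open text open_tag close_tag o F2 hon hopPre]
          have hFs2 : F2 = (text.length - (o + open_tag.length)) + (F2 - (text.length - (o + open_tag.length))) := by omega
          rw [hFs2, scan_skip_ones text open_tag close_tag _ (o + open_tag.length) _ (by omega)
            (fun j h1 h2 hp => hnoC j h1 hp)]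
          rw [scan_end _ _ _ _ _ _ (by omega)]
          rw [hlenT, hopcast]
          have e1 : ((o : Int) - (i : Int)).toNat = o - i := by omega
          have e2 : ((text.length : Int) - (o : Int)).toNat = text.length - o := by omega
          have e3 : ((text.length : Int) - (text.length : Int)).toNat = 0 := by omega
          rw [e1, e2, e3]
          have hsplit : text.length - o = open_tag.length + (text.length - (o + open_tag.length)) := by omega
          rw [hsplit, List.replicate_add]
          simp
        · -- o = text.length (only possible for an empty open tag)
          have hoe : o = text.length := by omega
          rw [scan_end _ _ _ _ _ _ (by omega)]
          rw [hlenT, hopcast]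
          have e1 : ((o : Int) - (i : Int)).toNat = o - i := by omega
          have e2 : ((text.length : Int) - (o : Int)).toNat = 0 := by omega
          have e3 : ((text.length : Int) - (text.length : Int)).toNat = 0 := by omega
          rw [e1, e2, e3]
          simp
      · -- open and close found: a full region, then recurse after it
        simp only [if_neg hcp1]
        obtain ⟨hcple, hcpub⟩ := findFrom_bounds text.toList close_tag.toList
          (o + open_tag.length) (by omega) (by rw [← hcpIdef]; exact hcp1)
        obtain ⟨_, hcpPre, hcpMin⟩ := PySem.Chars.findFrom_natCast_spec text.toList close_tag.toList
          (o + open_tag.length) (by omega) (by rw [← hcpIdef]; exact hcp1)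
        rw [← hcpIdef] at hcple hcpub hcpPre hcpMin
        rw [hLlen] at hcpub
        have hcpnn : (0 : Int) ≤ cpI := le_trans (by exact_mod_cast Nat.zero_le (o + open_tag.length)) hcple
        have hcpcast : cpI = ((cpI.toNat : Nat) : Int) := by omega
        set cc := cpI.toNat with hccdef
        have hoc : o + open_tag.length ≤ cc := by omega
        have hcub : cc + close_tag.length ≤ text.length := by omega
        set ren := cc + close_tag.length with hrendef
        have hon : o < text.length := by
          by_contra hcon
          have ho0 : open_tag.length = 0 := by omega
          have hcl0 : close_tag.length = 0 := by omega
          omega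
        obtain ⟨F2, hF2⟩ : ∃ F2, F1 = F2 + 1 := ⟨F1 - 1, by omega⟩
        rw [hF2, scan_step_open text open_tag close_tag o F2 hon hopPre]
        -- ones up to the close tag
        have hnoC : ∀ j, o + open_tag.length ≤ j → j < o + open_tag.length + (cc - (o + open_tag.length)) →
            ¬ close_tag.toList <+: text.toList.drop j := by
          intro j h1 h2 hp
          exact hcpMin j h1 (by omega) hp
        have hFs2 : F2 = (cc - (o + open_tag.length)) + (F2 - (cc - (o + open_tag.length))) := by omega
        rw [hFs2, scan_skip_ones text open_tag close_tag _ (o + open_tag.length) _ (by omega) hnoC]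
        have hck : o + open_tag.length + (cc - (o + open_tag.length)) = cc := by omega
        rw [hck]
        set F3 := F2 - (cc - (o + open_tag.length)) with hF3def
        have hre : cpI + PySem.Str.len close_tag = ((ren : Nat) : Int) := by
          simp [PySem.Str.len]
          omega
        rw [hre, hopcast]
        by_cases hcn : cc < text.length
        · obtain ⟨F4, hF4⟩ : ∃ F4, F3 = F4 + 1 := ⟨F3 - 1, by omega⟩
          rw [hF4, scan_step_close text open_tag close_tag cc F4 hcn hcpPre]
          have hreni : i < ren := by omega
          rw [ih ren F4 (by omega) (by omega) (by omega)]
          simp only [zpaint]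
          have e1 : ((o : Int) - (i : Int)).toNat = o - i := by omega
          have e2 : ((ren : Int) - (o : Int)).toNat = ren - o := by omega
          rw [e1, e2]
          have hsplit : ren - o = open_tag.length + ((cc - (o + open_tag.length)) + close_tag.length) := by omega
          rw [hsplit, List.replicate_add, List.replicate_add]
          simp only [List.append_assoc]
        · -- cc = text.length: empty close tag right at the end; the tail has no further segment
          have hce : cc = text.length := by omega
          have hcl0 : close_tag.length = 0 := by omega
          have hone : open_tag ≠ "" := by
            intro hoe
            exact hpre ⟨hoe, String.length_eq_zero_iff.mp (by omega)⟩
          rw [scan_end _ _ _ _ _ _ (by omega)]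
          obtain ⟨fuel3, hfl⟩ : ∃ fuel3, fuel2 = fuel3 + 1 := ⟨fuel2 - 1, by omega⟩
          have hrest : segsB text open_tag close_tag ((ren : Nat) : Int) fuel2 = [] := by
            rw [hfl]
            simp only [segsB, PySem.Str.findFrom_eq]
            have hnone : PySem.Chars.findFrom text.toList open_tag.toList ((ren : Nat) : Int) none = -1 := by
              rw [PySem.Chars.findFrom_natCast_eq_neg_one_iff text.toList open_tag.toList ren (by omega)]
              intro hinf
              have : text.toList.drop ren = [] := by
                apply List.drop_eq_nil_of_le
                omega
              rw [this] at hinf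
              exact hone (String.toList_eq_nil_iff.mp (List.eq_nil_of_infix_nil hinf))
            simp [hnone]
          rw [hrest]
          simp only [zpaint]
          have e1 : ((o : Int) - (i : Int)).toNat = o - i := by omega
          have e2 : ((ren : Int) - (o : Int)).toNat = ren - o := by omega
          have e3 : ((text.length : Int) - ((ren : Nat) : Int)).toNat = 0 := by omega
          rw [e1, e2, e3]
          have hsplit : ren - o = open_tag.length + (cc - (o + open_tag.length)) := by omega
          rw [hsplit, List.replicate_add]
          simp


-- ===== VERDICT (by name: the statement is the Claim_ definition above) =====
theorem get_bigmodel_mask_spec : Claim_equal_get_bigmodel_mask := by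
  intro text open_tag close_tag _ hpre
  unfold Spec_get_bigmodel_mask get_bigmodel_mask get_bigmodel_mask_alt
  have hA := loop_eq text open_tag close_tag hpre (text.length + 1) 0 (List.replicate text.length 0)
    (Nat.zero_le _) (by omega) (by simp) (by simp)
  have hB := scan_eq_zpaint text open_tag close_tag hpre (text.length + 1) 0 (3 * text.length + 3)
    (Nat.zero_le _) (by omega) (by omega)
  rw [Int.ofNat_zero] at hA hB
  rw [hA, hB]
  simp
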